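-- pv_equiv track=rewrite | github.com/DT-UCPH/cuc | agent/pipeline/steps/variant_row_unwrapper.py | _align_to_non_empty_anchor
-- ===== SOURCE A (Python) =====
-- def _align_to_non_empty_anchor(values: list[str], anchor: list[str]) -> list[str]:
--     """
--     Project compact values onto non-empty anchor slots.
--
--     Example:
--       values=['when','like','yes']
--       anchor=['','', 'Subordinating...', 'prep.', 'emph.']
--       -> ['', '', 'when', 'like', 'yes']
--     """
--     if len(values) <= 1 or len(anchor) <= len(values):
--         return values
--     non_empty_indexes = [idx for idx, item in enumerate(anchor) if (item or "").strip()]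
--     if len(non_empty_indexes) != len(values):
--         return values
--     out = [""] * len(anchor)
--     for value_index, target_index in enumerate(non_empty_indexes):
--         out[target_index] = values[value_index]
--     return out
-- ===== SOURCE B (Python) =====
-- def _align_to_non_empty_anchor(values: list[str], anchor: list[str]) -> list[str]:
--     if len(values) <= 1 or len(anchor) <= len(values):
--         return values
--     vals = list(values)
--     out = []
--     for item in reversed(anchor):
--         if (item or "").strip():
--             if not vals:
--                 return values
--             out.append(vals.pop())
--         else:
--             out.append("")
--     if vals:
--         return values
--     out.reverse()
--     return out
-- ===== Notes on version B (the rewrite author's own statement) =====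
-- stated objective: alternative
-- what changed: Replaces A's precomputed non-empty index list plus index-scatter into a preallocated output with a single backwards pass over anchor that consumes values from the end via pop, the length agreement being checked implicitly by exhaustion (run out / leftovers) instead of a separate count comparison.
import Mathlib
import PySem

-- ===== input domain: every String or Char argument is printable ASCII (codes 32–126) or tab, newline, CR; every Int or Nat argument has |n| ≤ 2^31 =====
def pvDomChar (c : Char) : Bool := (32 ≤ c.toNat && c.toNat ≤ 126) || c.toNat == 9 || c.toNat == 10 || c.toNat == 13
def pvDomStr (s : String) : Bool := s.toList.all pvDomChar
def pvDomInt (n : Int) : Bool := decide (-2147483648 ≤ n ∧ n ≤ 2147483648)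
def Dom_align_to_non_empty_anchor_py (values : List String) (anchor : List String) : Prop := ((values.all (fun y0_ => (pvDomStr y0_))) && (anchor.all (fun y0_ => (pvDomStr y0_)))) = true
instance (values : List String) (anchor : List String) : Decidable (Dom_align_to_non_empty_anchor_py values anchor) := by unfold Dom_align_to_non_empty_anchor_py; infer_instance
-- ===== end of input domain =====

-- B replaces A's precomputed non-empty index list + index scatter into a preallocated
-- output by one backwards pass over anchor that pops values from the end, checking the
-- length agreement implicitly by exhaustion (alternative decomposition, same cost).

-- ===== PORT A =====
-- truthiness of `(item or "").strip()`
def pvTruthy (item : String) : Bool :=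
  !(PySem.Str.strip (if item == "" then "" else item) == "")

def align_to_non_empty_anchor_py (values : List String) (anchor : List String) : List String :=
  if values.length ≤ 1 || anchor.length ≤ values.length then values
  else
    let non_empty_indexes : List Int :=
      ((PySem.List.enumerate anchor 0).filter (fun p => pvTruthy p.2)).map Prod.fst
    if non_empty_indexes.length ≠ values.length then values
    else
      -- for value_index, target_index in enumerate(non_empty_indexes): out[target_index] = values[value_index]
      -- (pyGetD/pySetD are exact here: the length check puts every index in range)
      (PySem.List.enumerate non_empty_indexes 0).foldl
        (fun out p => PySem.List.pySetD out p.2 (PySem.List.pyGetD values p.1 ""))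
        (List.replicate anchor.length "")

-- ===== PORT B =====
-- the `for item in reversed(anchor)` loop; state = (vals, out); `vals.pop()` on a
-- non-empty list returns the last element (getLast?) and drops it (dropLast) — exact;
-- `none` is the early `return values` taken when `vals` is exhausted
def pvPopLoop (ranc : List String) (vals : List String) (out : List String) :
    Option (List String × List String) :=
  match ranc with
  | [] => some (vals, out)
  | a :: rest =>
    if pvTruthy a then
      match vals.getLast? with
      | none => none
      | some x => pvPopLoop rest vals.dropLast (out ++ [x])
    else pvPopLoop rest vals (out ++ [""])

def align_to_non_empty_anchor_py_alt (values : List String) (anchor : List String) : List String :=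
  if values.length ≤ 1 || anchor.length ≤ values.length then values
  else
    match pvPopLoop anchor.reverse values [] with
    | none => values
    | some (vals, out) => if vals.isEmpty then out.reverse else values

-- ===== PRECONDITION & SPEC =====
def Spec_align_to_non_empty_anchor_py (values : List String) (anchor : List String) (out : List String) : Prop := out = align_to_non_empty_anchor_py_alt values anchor
instance (values : List String) (anchor : List String) (out : List String) : Decidable (Spec_align_to_non_empty_anchor_py values anchor out) := by unfold Spec_align_to_non_empty_anchor_py; infer_instance

-- ===== CLAIM (what is proved, stated in full; the proofs are below) =====
def Claim_equal_align_to_non_empty_anchor_py : Prop := ∀ (values : List String) (anchor : List String), Dom_align_to_non_empty_anchor_py values anchor → Spec_align_to_non_empty_anchor_py values anchor (align_to_non_empty_anchor_py values anchor)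

-- ===== LEMMAS AND PROOFS =====

-- proof-side bridge form: one forward pass consuming values in order
def pvConsume (vals : List String) (anchor : List String) : List String :=
  match anchor with
  | [] => []
  | a :: rest =>
    if pvTruthy a then vals.headD "" :: pvConsume vals.tail rest
    else "" :: pvConsume vals rest

-- ---------- A side: A equals the count-guarded pvConsume form ----------

-- A's index list, with the enumeration starting at an arbitrary offset s
def pvIdxFrom (s : Int) (anchor : List String) : List Int :=
  ((PySem.List.enumerate anchor s).filter (fun p => pvTruthy p.2)).map Prod.fst

theorem pvIdxFrom_cons (s : Int) (a : String) (rest : List String) :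
    pvIdxFrom s (a :: rest) =
      (if pvTruthy a then [s] else []) ++ pvIdxFrom (s + 1) rest := by
  simp [pvIdxFrom, PySem.List.enumerate_cons, List.filter_cons]
  split <;> simp

theorem pvIdxFrom_length (s : Int) (anchor : List String) :
    (pvIdxFrom s anchor).length = anchor.countP pvTruthy := by
  induction anchor generalizing s with
  | nil => simp [pvIdxFrom]
  | cons a rest ih =>
    rw [pvIdxFrom_cons, List.countP_cons]
    by_cases h : pvTruthy a <;> simp [h, ih]

theorem pvIdxFrom_shift (s : Int) (anchor : List String) :
    pvIdxFrom (s + 1) anchor = (pvIdxFrom s anchor).map (· + 1) := by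
  induction anchor generalizing s with
  | nil => simp [pvIdxFrom]
  | cons a rest ih =>
    rw [pvIdxFrom_cons, pvIdxFrom_cons, List.map_append, ih]
    by_cases h : pvTruthy a <;> simp [h]

theorem pvIdxFrom_nonneg (s : Int) (anchor : List String) (h : 0 ≤ s) :
    ∀ i ∈ pvIdxFrom s anchor, 0 ≤ i := by
  induction anchor generalizing s with
  | nil => simp [pvIdxFrom]
  | cons a rest ih =>
    rw [pvIdxFrom_cons]
    intro i hi
    rcases List.mem_append.1 hi with h1 | h1
    · by_cases hp : pvTruthy a <;> simp [hp] at h1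
      omega
    · exact ih (s + 1) (by omega) i h1

theorem pvSetD_cons_succ (x : String) (out : List String) (i : Int) (hi : 0 ≤ i) (v : String) :
    PySem.List.pySetD (x :: out) (i + 1) v = x :: PySem.List.pySetD out i v := by
  rw [PySem.List.pySetD_of_nonneg _ _ (by omega), PySem.List.pySetD_of_nonneg _ _ hi]
  have h1 : (i + 1).toNat = i.toNat + 1 := by omega
  simp [h1]

-- shift lemma: scattering into a cons with all indices bumped by one
theorem pvShiftFold (ps : List (Int × String)) (x : String) (out : List String)
    (hnn : ∀ p ∈ ps, 0 ≤ p.1) :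
    (ps.map (fun p => (p.1 + 1, p.2))).foldl
        (fun o p => PySem.List.pySetD o p.1 p.2) (x :: out)
      = x :: ps.foldl (fun o p => PySem.List.pySetD o p.1 p.2) out := by
  induction ps generalizing out with
  | nil => rfl
  | cons p ps ih =>
    simp only [List.map_cons, List.foldl_cons]
    rw [pvSetD_cons_succ x out p.1 (hnn p (by simp)) p.2]
    exact ih _ (fun q hq => hnn q (by simp [hq]))

-- the enumerate-and-index fold is the zip fold (indices are positions in pre ++ values)
theorem pvZipFold (idxs : List Int) (pre values : List String) (out : List String)
    (h : idxs.length = values.length) :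
    (PySem.List.enumerate idxs (pre.length : Int)).foldl
        (fun o p => PySem.List.pySetD o p.2 (PySem.List.pyGetD (pre ++ values) p.1 "")) out
      = (idxs.zip values).foldl (fun o p => PySem.List.pySetD o p.1 p.2) out := by
  induction idxs generalizing pre values out with
  | nil => simp
  | cons i is ih =>
    cases values with
    | nil => simp at h
    | cons v vs =>
      simp only [PySem.List.enumerate_cons, List.foldl_cons, List.zip_cons_cons]
      have hget : PySem.List.pyGetD (pre ++ v :: vs) (pre.length : Int) "" = v := by
        simp [PySem.List.pyGetD]
      rw [hget]
      have hlen : (pre.length : Int) + 1 = ((pre ++ [v]).length : Int) := by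
        simp
      have happ : pre ++ v :: vs = (pre ++ [v]) ++ vs := by simp
      rw [hlen, happ]
      exact ih (pre ++ [v]) vs _ (by simpa using h)

-- the zip scatter into a blank row is the forward consuming pass
theorem pvMain (anchor values : List String)
    (h : (pvIdxFrom 0 anchor).length = values.length) :
    ((pvIdxFrom 0 anchor).zip values).foldl
        (fun o p => PySem.List.pySetD o p.1 p.2) (List.replicate anchor.length "")
      = pvConsume values anchor := by
  induction anchor generalizing values with
  | nil =>
    have : values = [] := by
      simpa [pvIdxFrom, List.length_eq_zero_iff] using h.symm
    simp [this, pvConsume]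
  | cons a rest ih =>
    have hshift : pvIdxFrom 1 rest = (pvIdxFrom 0 rest).map (· + 1) := by
      simpa using pvIdxFrom_shift 0 rest
    have hpm : (Prod.map (· + (1:Int)) (id : String → String)) =
        (fun p : Int × String => (p.1 + 1, p.2)) := by
      funext p; cases p; rfl
    rw [pvIdxFrom_cons] at h ⊢
    by_cases hp : pvTruthy a
    · simp only [hp, if_true, List.singleton_append, List.length_cons,
        zero_add, hshift, List.length_map] at h ⊢
      cases values with
      | nil => simp at h
      | cons v vs =>
        have hlen : (pvIdxFrom 0 rest).length = vs.length := by
          simp at h; omega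
        simp only [List.zip_cons_cons, List.replicate_succ,
          List.foldl_cons]
        have h0 : PySem.List.pySetD ("" :: List.replicate rest.length "") (0 : Int) v
            = v :: List.replicate rest.length "" := by
          rw [PySem.List.pySetD_of_nonneg _ _ (by omega)]; rfl
        rw [h0, List.zip_map_left, hpm, pvShiftFold _ _ _ (fun p hp' =>
          pvIdxFrom_nonneg 0 rest le_rfl p.1 (List.of_mem_zip hp').1)]
        rw [ih vs hlen]
        simp [pvConsume, hp]
    · simp only [hp, if_false, Bool.false_eq_true, List.nil_append,
        zero_add, hshift, List.length_map] at h ⊢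
      have hlen : (pvIdxFrom 0 rest).length = values.length := h
      simp only [List.length_cons, List.replicate_succ]
      rw [List.zip_map_left, hpm, pvShiftFold _ _ _ (fun p hp' =>
        pvIdxFrom_nonneg 0 rest le_rfl p.1 (List.of_mem_zip hp').1)]
      rw [ih values hlen]
      simp [pvConsume, hp]

theorem pvBridgeA (values anchor : List String) :
    align_to_non_empty_anchor_py values anchor =
      if values.length ≤ 1 || anchor.length ≤ values.length then values
      else if anchor.countP pvTruthy ≠ values.length then values
      else pvConsume values anchor := by
  unfold align_to_non_empty_anchor_py
  by_cases hg : values.length ≤ 1 || anchor.length ≤ values.length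
  · simp [hg]
  · simp only [hg, Bool.false_eq_true, if_false]
    have hcnt : ((PySem.List.enumerate anchor 0).filter
        (fun p => pvTruthy p.2) |>.map Prod.fst).length = anchor.countP pvTruthy :=
      pvIdxFrom_length 0 anchor
    rw [hcnt]
    by_cases hc : List.countP pvTruthy anchor ≠ values.length
    · rw [if_pos hc, if_pos hc]
    · rw [if_neg hc, if_neg hc]
      have hc : List.countP pvTruthy anchor = values.length := by
        by_contra hne; exact hc hne
      have hz := pvZipFold (pvIdxFrom 0 anchor) [] values
        (List.replicate anchor.length "")
        (by rw [pvIdxFrom_length]; exact hc)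
      simp only [List.length_nil, Nat.cast_zero, List.nil_append] at hz
      calc (PySem.List.enumerate (pvIdxFrom 0 anchor) 0).foldl
            (fun out p => PySem.List.pySetD out p.2 (PySem.List.pyGetD values p.1 ""))
            (List.replicate anchor.length "")
          = ((pvIdxFrom 0 anchor).zip values).foldl
            (fun o p => PySem.List.pySetD o p.1 p.2) (List.replicate anchor.length "") := hz
        _ = pvConsume values anchor := pvMain anchor values (by rw [pvIdxFrom_length]; exact hc)

-- ---------- B side: the pop loop equals the same count-guarded pvConsume form ----------

theorem pvPopLoop_append (r s : List String) (vals out : List String) :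
    pvPopLoop (r ++ s) vals out
      = (pvPopLoop r vals out).bind (fun p => pvPopLoop s p.1 p.2) := by
  induction r generalizing vals out with
  | nil => simp [pvPopLoop]
  | cons a rest ih =>
    simp only [List.cons_append, pvPopLoop]
    by_cases hp : pvTruthy a
    · simp only [hp, if_true]
      cases vals.getLast? with
      | none => simp
      | some x => exact ih _ _
    · simp only [hp, Bool.false_eq_true, if_false]
      exact ih _ _

-- completed run: when anchor has exactly |suf| non-empty slots, the reverse pass pops
-- exactly suf off the end and leaves pre, producing pvConsume's output reversed
theorem pvPopLoop_run (anchor : List String) :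
    ∀ pre suf : List String, anchor.countP pvTruthy = suf.length →
    pvPopLoop anchor.reverse (pre ++ suf) []
      = some (pre, (pvConsume suf anchor).reverse) := by
  induction anchor with
  | nil =>
    intro pre suf h
    have : suf = [] := by simpa [List.length_eq_zero_iff] using h.symm
    simp [this, pvPopLoop, pvConsume]
  | cons a anc ih =>
    intro pre suf h
    rw [List.reverse_cons, pvPopLoop_append]
    rw [List.countP_cons] at h
    by_cases hp : pvTruthy a
    · simp only [hp, if_true] at h
      cases suf with
      | nil => simp at h
      | cons v vs =>
        have h' : anc.countP pvTruthy = vs.length := by simp at h; omega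
        have hsplit : pre ++ v :: vs = (pre ++ [v]) ++ vs := by simp
        rw [hsplit, ih (pre ++ [v]) vs h']
        simp only [Option.bind_some, pvPopLoop, hp, if_true]
        rw [List.getLast?_concat, List.dropLast_concat]
        simp [pvConsume, hp]
    · simp only [hp, Bool.false_eq_true, if_false, add_zero] at h
      rw [ih pre suf h]
      simp [pvPopLoop, pvConsume, hp]

-- exhaustion: more non-empty slots than values makes the pass hit an empty pop
theorem pvPopLoop_none (anchor : List String) :
    ∀ vals : List String, vals.length < anchor.countP pvTruthy →
    pvPopLoop anchor.reverse vals [] = none := by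
  induction anchor with
  | nil => intro vals h; simp at h
  | cons a anc ih =>
    intro vals h
    rw [List.reverse_cons, pvPopLoop_append]
    rw [List.countP_cons] at h
    by_cases hp : pvTruthy a
    · simp only [hp, if_true] at h
      by_cases hlt : vals.length < anc.countP pvTruthy
      · rw [ih vals hlt]; rfl
      · have hle : anc.countP pvTruthy = vals.length := by omega
        have := pvPopLoop_run anc [] vals hle
        simp only [List.nil_append] at this
        rw [this]
        simp [pvPopLoop, hp]
    · simp only [hp, Bool.false_eq_true, if_false, add_zero] at h
      rw [ih vals h]; rfl

theorem pvBridgeB (values anchor : List String) :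
    align_to_non_empty_anchor_py_alt values anchor =
      if values.length ≤ 1 || anchor.length ≤ values.length then values
      else if anchor.countP pvTruthy ≠ values.length then values
      else pvConsume values anchor := by
  unfold align_to_non_empty_anchor_py_alt
  by_cases hg : values.length ≤ 1 || anchor.length ≤ values.length
  · simp [hg]
  · simp only [hg, Bool.false_eq_true, if_false]
    by_cases hc : anchor.countP pvTruthy = values.length
    · have := pvPopLoop_run anchor [] values hc
      simp only [List.nil_append] at this
      rw [this]
      simp [hc]
    · rw [if_pos hc]
      rcases Nat.lt_or_ge (anchor.countP pvTruthy) values.length with hlt | hge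
      · -- too few non-empty slots: values left over after the pass
        have hrun := pvPopLoop_run anchor
          (values.take (values.length - anchor.countP pvTruthy))
          (values.drop (values.length - anchor.countP pvTruthy))
          (by simp; omega)
        rw [List.take_append_drop] at hrun
        rw [hrun]
        have hne : (values.take (values.length - anchor.countP pvTruthy)).isEmpty = false := by
          rw [List.isEmpty_eq_false_iff, Ne, List.take_eq_nil_iff]
          push Not
          constructor
          · omega
          · intro hnil; rw [hnil] at hlt; simp at hlt
        simp [hne]
      · -- too many non-empty slots: the pass exhausts values
        have hlt : values.length < anchor.countP pvTruthy := by omega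
        rw [pvPopLoop_none anchor values hlt]

-- ===== VERDICT (by name: the statement is the Claim_ definition above) =====
theorem align_to_non_empty_anchor_py_spec : Claim_equal_align_to_non_empty_anchor_py := by
  intro values anchor _
  unfold Spec_align_to_non_empty_anchor_py
  rw [pvBridgeA, pvBridgeB]
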